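-- pv_equiv track=rewrite | github.com/roseengineering/silicon5351 | silicon5351.py | approximate_fraction
-- ===== SOURCE A (Python) =====
-- def approximate_fraction(n, d, max_denom):
--     # https://github.com/python/cpython/blob/master/Lib/fractions.py
--     denom = d
--     if denom > max_denom:
--         num = n
--         p0 = 0; q0 = 1; p1 = 1; q1 = 0
--         while denom != 0:
--             a = num // denom
--             b = num % denom
--             q2 = q0 + a * q1
--             if q2 > max_denom:
--                 break
--             p2 = p0 + a * p1
--             p0 = p1; q0 = q1; p1 = p2; q1 = q2
--             num = denom; denom = b
--         n = p1; d = q1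
--     return n, d
-- ===== SOURCE B (Python) =====
-- def approximate_fraction(n, d, max_denom):
--     # Two-phase rewrite: collect Euclidean partial quotients first, then
--     # build convergents over that list with the same early break.
--     if d <= max_denom:
--         return n, d
--     quotients = []
--     num, denom = n, d
--     while denom != 0:
--         quotients.append(num // denom)
--         num, denom = denom, num % denom
--     p0, q0, p1, q1 = 0, 1, 1, 0
--     for a in quotients:
--         q2 = q0 + a * q1
--         if q2 > max_denom:
--             break
--         p0, q0, p1, q1 = p1, q1, p0 + a * p1, q2
--     return p1, q1
-- ===== Notes on version B (the rewrite author's own statement) =====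
-- stated objective: alternative
-- what changed: B splits A's single intertwined while-loop into two phases: it first runs the Euclidean algorithm to collect the full list of partial quotients, then folds the convergent recurrence over that list with the same early break, guarding with an early return instead of A's mutation-under-guard.
import Mathlib
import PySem

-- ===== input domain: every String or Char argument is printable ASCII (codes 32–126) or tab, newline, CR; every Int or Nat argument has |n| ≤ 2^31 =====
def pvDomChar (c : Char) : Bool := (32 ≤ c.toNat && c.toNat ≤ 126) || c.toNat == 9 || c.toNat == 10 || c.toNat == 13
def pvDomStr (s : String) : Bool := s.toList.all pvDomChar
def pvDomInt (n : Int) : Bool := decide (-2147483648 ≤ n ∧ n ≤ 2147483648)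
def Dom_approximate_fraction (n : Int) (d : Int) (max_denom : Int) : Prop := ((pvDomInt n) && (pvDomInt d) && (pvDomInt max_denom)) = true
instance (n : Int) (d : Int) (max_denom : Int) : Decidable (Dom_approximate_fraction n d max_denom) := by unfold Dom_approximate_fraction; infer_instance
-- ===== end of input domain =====

-- B recollects the Euclidean partial quotients first and then folds the convergent
-- recurrence over that list (same values, different decomposition); objective: alternative.

-- termination measure lemma, cited by both ports' recursions
theorem pvModNatAbsLt (num denom : Int) (h : denom ≠ 0) :
    (PySem.Int.mod num denom).natAbs < denom.natAbs := by
  rcases lt_or_gt_of_ne h with hneg | hpos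
  · have := PySem.Int.mod_neg_bounds num hneg
    omega
  · have h1 := PySem.Int.mod_nonneg num hpos
    have h2 := PySem.Int.mod_lt num hpos
    omega

-- ===== PORT A =====
def pvALoop (num denom p0 q0 p1 q1 max_denom : Int) : Int × Int :=
  if _h : denom = 0 then (p1, q1)
  else
    let a := PySem.Int.floordiv num denom
    let b := PySem.Int.mod num denom
    let q2 := q0 + a * q1
    if q2 > max_denom then (p1, q1)
    else pvALoop denom b p1 q1 (p0 + a * p1) q2 max_denom
termination_by denom.natAbs
decreasing_by exact pvModNatAbsLt num denom _h

def approximate_fraction (n : Int) (d : Int) (max_denom : Int) : Int × Int :=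
  if d > max_denom then pvALoop n d 0 1 1 0 max_denom
  else (n, d)

-- ===== PORT B =====
def pvQuotients (num denom : Int) : List Int :=
  if _h : denom = 0 then []
  else PySem.Int.floordiv num denom :: pvQuotients denom (PySem.Int.mod num denom)
termination_by denom.natAbs
decreasing_by exact pvModNatAbsLt num denom _h

def pvConv (qs : List Int) (max_denom p0 q0 p1 q1 : Int) : Int × Int :=
  match qs with
  | [] => (p1, q1)
  | a :: rest =>
    let q2 := q0 + a * q1
    if q2 > max_denom then (p1, q1)
    else pvConv rest max_denom p1 q1 (p0 + a * p1) q2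

def approximate_fraction_alt (n : Int) (d : Int) (max_denom : Int) : Int × Int :=
  if d ≤ max_denom then (n, d)
  else pvConv (pvQuotients n d) max_denom 0 1 1 0

-- ===== PRECONDITION & SPEC =====
def Spec_approximate_fraction (n : Int) (d : Int) (max_denom : Int) (out : Int × Int) : Prop := out = approximate_fraction_alt n d max_denom
instance (n : Int) (d : Int) (max_denom : Int) (out : Int × Int) : Decidable (Spec_approximate_fraction n d max_denom out) := by unfold Spec_approximate_fraction; infer_instance

-- ===== CLAIM (what is proved, stated in full; the proofs are below) =====
def Claim_equal_approximate_fraction : Prop := ∀ (n : Int) (d : Int) (max_denom : Int), Dom_approximate_fraction n d max_denom → Spec_approximate_fraction n d max_denom (approximate_fraction n d max_denom)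

-- ===== LEMMAS AND PROOFS =====
theorem pvALoop_eq_conv (k : Nat) : ∀ (num denom p0 q0 p1 q1 m : Int), denom.natAbs ≤ k →
    pvALoop num denom p0 q0 p1 q1 m = pvConv (pvQuotients num denom) m p0 q0 p1 q1 := by
  induction k with
  | zero =>
    intro num denom p0 q0 p1 q1 m hk
    have hd : denom = 0 := by omega
    subst hd
    rw [pvALoop, pvQuotients]
    simp [pvConv]
  | succ k ih =>
    intro num denom p0 q0 p1 q1 m hk
    by_cases hd : denom = 0
    · subst hd; rw [pvALoop, pvQuotients]; simp [pvConv]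
    · rw [pvALoop, pvQuotients]
      simp only [hd, dite_false, pvConv]
      by_cases hq : q0 + PySem.Int.floordiv num denom * q1 > m
      · simp [hq]
      · simp only [hq, if_false]
        exact ih denom (PySem.Int.mod num denom) _ _ _ _ m
          (by have := pvModNatAbsLt num denom hd; omega)

-- ===== VERDICT (by name: the statement is the Claim_ definition above) =====
theorem approximate_fraction_spec : Claim_equal_approximate_fraction := by
  intro n d m _
  unfold Spec_approximate_fraction approximate_fraction approximate_fraction_alt
  by_cases h : d > m
  · simp only [h, if_true, show ¬ d ≤ m by omega, if_false]
    exact pvALoop_eq_conv d.natAbs n d 0 1 1 0 m le_rfl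
  · simp only [h, if_false, show d ≤ m by omega, if_true]
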